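-- pv_equiv track=rewrite | github.com/pinotronic/LimpiandoTexto | Proceso.py | colocandoPuntosDespuesRenglon
-- ===== SOURCE A (Python) =====
-- def colocandoPuntosDespuesRenglon(ContenedorTexto):
--     #ContenedorTexto  = '\n'.join(ContenedorTexto.split())
--     ContenedorTexto = ContenedorTexto +"XX"
--     Casilla2 = ""
--     Casilla1 = ""
--     TextoFinal = ""
--     for letra in ContenedorTexto:
--             Final = Casilla2
--             Casilla2 = Casilla1
--             Casilla1 = letra
--             # M \n m
--             if Casilla2 == "\n" and Casilla1.isupper() == True:
--                 Casilla2 = Casilla2.replace('\n', '.\n')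
--                 TextoFinal = TextoFinal + Final
--             else:
--                 TextoFinal = TextoFinal + Final
--
--     return TextoFinal
-- ===== SOURCE B (Python) =====
-- def colocandoPuntosDespuesRenglon(ContenedorTexto):
--     # Staged passes: split into lines, rejoin inserting a dot before the
--     # separator of every line that starts with an uppercase letter, then dot
--     # the final newline (end of text closes the last sentence too).
--     first, *resto = ContenedorTexto.split('\n')
--     res = first
--     for linea in resto:
--         res += ('.\n' if linea[:1].isupper() else '\n') + linea
--     if res.endswith('\n'):
--         res = res[:-1] + '.\n'
--     return res
-- ===== Notes on version B (the rewrite author's own statement) =====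
-- stated objective: simpler
-- what changed: Replaces A's character-by-character two-cell delay buffer (with a two-character sentinel pad and a replace-into-the-buffer trick) by staged passes: split the text into lines on newlines, rejoin them inserting a dot before the separator when the next line starts with an uppercase letter, then dot the final newline.
import Mathlib
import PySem

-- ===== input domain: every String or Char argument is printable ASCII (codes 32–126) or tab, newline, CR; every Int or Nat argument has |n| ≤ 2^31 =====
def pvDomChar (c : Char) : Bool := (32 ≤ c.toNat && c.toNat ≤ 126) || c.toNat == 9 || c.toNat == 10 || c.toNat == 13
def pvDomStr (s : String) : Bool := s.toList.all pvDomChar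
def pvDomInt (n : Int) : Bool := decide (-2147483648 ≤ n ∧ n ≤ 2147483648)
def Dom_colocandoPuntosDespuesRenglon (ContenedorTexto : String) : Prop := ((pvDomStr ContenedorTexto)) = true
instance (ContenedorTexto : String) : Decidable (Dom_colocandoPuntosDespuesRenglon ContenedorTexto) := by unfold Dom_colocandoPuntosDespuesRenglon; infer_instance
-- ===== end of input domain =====

-- B replaces A's two-cell delay buffer (with 'XX' sentinel padding) by staged
-- passes: split on '\n', rejoin with computed separators, dot the final newline;
-- objective: simpler.

-- ===== PORT A =====
-- Hand port of Python str.isupper (no PySem string-level primitive): at least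
-- one cased character and no lowercase one; exact on the ASCII domain.
def pvStrIsupper (cs : List Char) : Bool :=
  cs.any PySem.Chars.isupper && cs.all (fun c => !PySem.Chars.islower c)

-- One iteration of A's loop; state = (Casilla2, Casilla1, TextoFinal) as char lists.
def pvStepA (st : List Char × List Char × List Char) (letra : Char) :
    List Char × List Char × List Char :=
  let Final := st.1
  let Casilla2 := st.2.1          -- Casilla2 = Casilla1
  let Casilla1 := [letra]         -- Casilla1 = letra
  if Casilla2 == ['\n'] && pvStrIsupper Casilla1 then
    (PySem.Chars.replace Casilla2 ['\n'] ['.', '\n'], Casilla1, st.2.2 ++ Final)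
  else
    (Casilla2, Casilla1, st.2.2 ++ Final)

def colocandoPuntosDespuesRenglon (ContenedorTexto : String) : String :=
  let t := ContenedorTexto.toList ++ ['X', 'X']   -- ContenedorTexto + "XX"
  let r := t.foldl pvStepA ([], [], [])
  String.ofList r.2.2

-- ===== PORT B =====
-- first, *resto = ContenedorTexto.split('\n'); join; then dot the final newline.
def colocandoPuntosDespuesRenglon_alt (ContenedorTexto : String) : String :=
  match PySem.Chars.splitOn ContenedorTexto.toList ['\n'] with
  | [] => ""               -- unreachable: str.split never returns an empty list
  | first :: resto =>
    let res := resto.foldl (fun res linea =>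
        res ++ ((if pvStrIsupper (PySem.List.slice linea none (some 1))
                 then ['.', '\n'] else ['\n']) ++ linea)) first
    let res := if PySem.Chars.endswith res ['\n']
               then PySem.List.slice res none (some (-1)) ++ ['.', '\n']
               else res
    String.ofList res

-- ===== PRECONDITION & SPEC =====
def Spec_colocandoPuntosDespuesRenglon (ContenedorTexto : String) (out : String) : Prop := out = colocandoPuntosDespuesRenglon_alt ContenedorTexto
instance (ContenedorTexto : String) (out : String) : Decidable (Spec_colocandoPuntosDespuesRenglon ContenedorTexto out) := by unfold Spec_colocandoPuntosDespuesRenglon; infer_instance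

-- ===== CLAIM (what is proved, stated in full; the proofs are below) =====
def Claim_equal_colocandoPuntosDespuesRenglon : Prop := ∀ (ContenedorTexto : String), Dom_colocandoPuntosDespuesRenglon ContenedorTexto → Spec_colocandoPuntosDespuesRenglon ContenedorTexto (colocandoPuntosDespuesRenglon ContenedorTexto)

-- ===== LEMMAS AND PROOFS =====

-- What a character a is emitted as by A, given the character b that follows it
-- ('X' plays the character after the end of the text, as in A's sentinel).
def pvEmit (a b : Char) : List Char :=
  if a == '\n' && pvStrIsupper [b] then ['.', '\n'] else [a]

-- Pairwise characterisation of A's output.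
def pvOut : List Char → List Char
  | [] => []
  | [c] => pvEmit c 'X'
  | a :: b :: l => pvEmit a b ++ pvOut (b :: l)

theorem pvStepA_singleton (x2 tf : List Char) (b c : Char) :
    pvStepA (x2, [b], tf) c = (pvEmit b c, [c], tf ++ x2) := by
  unfold pvStepA pvEmit
  by_cases hb : b = '\n'
  · subst hb
    by_cases hc : pvStrIsupper [c] = true
    · simp [hc]
      decide
    · simp [hc]
  · have hb1 : ([b] == ['\n']) = false := by simp [hb]
    have hb2 : (b == '\n') = false := by simp [hb]
    simp [hb1, hb2]

theorem pvStepA_empty (x2 tf : List Char) (c : Char) :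
    pvStepA (x2, [], tf) c = ([], [c], tf ++ x2) := by
  simp [pvStepA]

theorem pvFoldA_main (l : List Char) (a b : Char) (tf : List Char) :
    (List.foldl pvStepA (pvEmit a b, [b], tf) (l ++ ['X', 'X'])).2.2
      = tf ++ pvEmit a b ++ pvOut (b :: l) := by
  induction l generalizing a b tf with
  | nil =>
      simp only [List.nil_append, List.foldl_cons, List.foldl_nil,
        pvStepA_singleton, pvOut]
  | cons c l ih =>
      simp only [List.cons_append, List.foldl_cons, pvStepA_singleton]
      rw [ih]
      simp [pvOut, List.append_assoc]

theorem pvA_eq (s : String) :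
    colocandoPuntosDespuesRenglon s = String.ofList (pvOut s.toList) := by
  unfold colocandoPuntosDespuesRenglon
  match h : s.toList with
  | [] =>
      simp only [List.nil_append, List.foldl_cons, List.foldl_nil,
        pvStepA_empty, pvStepA_singleton, pvOut]
  | [x] =>
      simp only [List.cons_append, List.nil_append, List.foldl_cons,
        List.foldl_nil, pvStepA_empty, List.append_nil, pvStepA_singleton, pvOut]
  | x :: y :: l =>
      simp only [List.cons_append, List.foldl_cons, pvStepA_empty,
        List.append_nil, pvStepA_singleton]
      rw [pvFoldA_main]
      simp [pvOut]

-- Right-recursive splitting on '\n': (first line, remaining lines).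
def pvSplit : List Char → List Char × List (List Char)
  | [] => ([], [])
  | c :: rest =>
      let p := pvSplit rest
      if c = '\n' then ([], p.1 :: p.2) else (c :: p.1, p.2)

theorem pvSplitOn_go_eq (l : List Char) (fuel : Nat) (cur : List Char)
    (acc : List (List Char)) (hf : l.length ≤ fuel) :
    PySem.Chars.splitOn.go ['\n'] fuel l cur acc
      = acc.reverse ++ ((cur.reverse ++ (pvSplit l).1) :: (pvSplit l).2) := by
  induction l generalizing fuel cur acc with
  | nil =>
      cases fuel <;> simp [PySem.Chars.splitOn.go, pvSplit]
  | cons c rest ih =>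
      cases fuel with
      | zero => simp at hf
      | succ f =>
          rw [PySem.Chars.splitOn.go]
          by_cases hc : c = '\n'
          · subst hc
            have hp : List.isPrefixOf ['\n'] ('\n' :: rest) = true := by
              simp [List.isPrefixOf]
            have hd : List.drop ['\n'].length ('\n' :: rest) = rest := rfl
            simp only [hp, if_true, hd]
            rw [ih f [] (cur.reverse :: acc) (by simpa using Nat.le_of_succ_le_succ hf)]
            simp [pvSplit]
          · have hp : List.isPrefixOf ['\n'] (c :: rest) = false := by
              simp only [List.isPrefixOf, Bool.and_eq_false_iff]
              left
              simp [Ne.symm hc]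
            simp only [hp, Bool.false_eq_true, if_false]
            rw [ih f (c :: cur) acc (by simpa using Nat.le_of_succ_le_succ hf)]
            simp [pvSplit, hc]

theorem pvSplitOn_eq (l : List Char) :
    PySem.Chars.splitOn l ['\n'] = (pvSplit l).1 :: (pvSplit l).2 := by
  unfold PySem.Chars.splitOn
  rw [pvSplitOn_go_eq l (l.length + 1) [] [] (by omega)]
  simp

-- The trailing fix-up: dot a final newline.
def pvFix (r : List Char) : List Char :=
  if PySem.Chars.endswith r ['\n'] then r.dropLast ++ ['.', '\n'] else r

-- The separator B chooses before a line.
def pvSep (linea : List Char) : List Char :=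
  (if pvStrIsupper (linea.take 1) then ['.', '\n'] else ['\n']) ++ linea

theorem pvEndswith_iff (r : List Char) :
    PySem.Chars.endswith r ['\n'] = true ↔ r.getLast? = some '\n' := by
  rw [PySem.Chars.endswith_iff]
  constructor
  · rintro ⟨t, rfl⟩; simp
  · intro h
    rcases List.eq_nil_or_concat r with rfl | ⟨t, c, rfl⟩
    · simp at h
    · simp at h
      exact ⟨t, by simp [h]⟩

theorem pvFix_append (x r : List Char) (hr : r ≠ []) :
    pvFix (x ++ r) = x ++ pvFix r := by
  unfold pvFix
  have h1 : (x ++ r).getLast? = r.getLast? := List.getLast?_append_of_ne_nil _ hr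
  by_cases h : PySem.Chars.endswith r ['\n'] = true
  · have h2 : PySem.Chars.endswith (x ++ r) ['\n'] = true := by
      rw [pvEndswith_iff] at h ⊢; rw [h1]; exact h
    rw [if_pos h, if_pos h2, List.dropLast_append_of_ne_nil hr]
    simp
  · have h2 : ¬ PySem.Chars.endswith (x ++ r) ['\n'] = true := by
      rw [pvEndswith_iff] at h ⊢; rw [h1]; exact h
    rw [if_neg h, if_neg h2]

theorem pvFix_cons (c : Char) (r : List Char) (hc : c ≠ '\n') :
    pvFix (c :: r) = c :: pvFix r := by
  cases r with
  | nil =>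
      simp [pvFix, PySem.Chars.endswith, List.isSuffixOf, Ne.symm hc]
  | cons d r => exact pvFix_append [c] (d :: r) (by simp)

theorem pvSep_ne_nil (linea : List Char) : pvSep linea ≠ [] := by
  unfold pvSep; split <;> simp

-- Core: A's pairwise characterisation equals B's split/join/fix composition.
theorem pvOut_eq_split (l : List Char) :
    pvOut l = pvFix ((pvSplit l).1 ++ (pvSplit l).2.flatMap pvSep) := by
  induction l with
  | nil => decide
  | cons c rest ih =>
      by_cases hc : c = '\n'
      · subst hc
        cases hr : rest with
        | nil => decide
        | cons d rest' =>
            rw [hr] at ih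
            have hOut : pvOut ('\n' :: d :: rest')
                = pvEmit '\n' d ++ pvOut (d :: rest') := rfl
            have hsplit : pvSplit ('\n' :: d :: rest')
                = ([], (pvSplit (d :: rest')).1 :: (pvSplit (d :: rest')).2) := by
              simp [pvSplit]
            rw [hOut, ih, hsplit]
            simp only [List.nil_append, List.flatMap_cons]
            have hsep : pvSep (pvSplit (d :: rest')).1
                = pvEmit '\n' d ++ (pvSplit (d :: rest')).1 := by
              by_cases hd : d = '\n'
              · have h1 : (pvSplit (d :: rest')).1 = [] := by
                  subst hd; simp [pvSplit]
                rw [h1]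
                subst hd
                simp only [pvSep, pvEmit, pvStrIsupper]
                decide
              · have h1 : (pvSplit (d :: rest')).1 = d :: (pvSplit rest').1 := by
                  simp [pvSplit, hd]
                rw [h1]
                simp only [pvSep, pvEmit, List.take_succ_cons, List.take_zero]
                by_cases hu : pvStrIsupper [d] = true
                · simp [hu]
                · simp [Bool.eq_false_iff.mpr hu]
            have hne : (pvSplit (d :: rest')).1
                ++ List.flatMap pvSep (pvSplit (d :: rest')).2 ≠ [] := by
              by_cases hd : d = '\n'
              · have h2 : (pvSplit (d :: rest')).2
                    = (pvSplit rest').1 :: (pvSplit rest').2 := by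
                  subst hd; simp [pvSplit]
                rw [h2]
                simp only [List.flatMap_cons]
                intro hcontra
                rcases List.append_eq_nil_iff.mp hcontra with ⟨_, h3⟩
                rcases List.append_eq_nil_iff.mp h3 with ⟨h4, _⟩
                exact pvSep_ne_nil _ h4
              · have h1 : (pvSplit (d :: rest')).1 = d :: (pvSplit rest').1 := by
                  simp [pvSplit, hd]
                simp [h1]
            rw [hsep, List.append_assoc, pvFix_append _ _ hne]
      · have h1 : (pvSplit (c :: rest)).1 = c :: (pvSplit rest).1 := by
          simp [pvSplit, hc]
        have h2 : (pvSplit (c :: rest)).2 = (pvSplit rest).2 := by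
          simp [pvSplit, hc]
        have hOut : pvOut (c :: rest) = c :: pvOut rest := by
          cases rest with
          | nil => simp [pvOut, pvEmit, hc]
          | cons d r => simp [pvOut, pvEmit, hc]
        rw [hOut, ih, h1, h2, List.cons_append, pvFix_cons c _ hc]

theorem pvB_eq (s : String) :
    colocandoPuntosDespuesRenglon_alt s = String.ofList (pvOut s.toList) := by
  unfold colocandoPuntosDespuesRenglon_alt
  rw [pvSplitOn_eq]
  simp only [PySem.List.foldl_append_eq_flatMap]
  have hs : ∀ linea : List Char,
      PySem.List.slice linea none (some 1) = linea.take 1 := fun linea => by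
    simpa using PySem.List.slice_to_natCast linea 1
  have hsep : (fun linea => (if pvStrIsupper (PySem.List.slice linea none (some 1))
      then ['.', '\n'] else ['\n']) ++ linea) = pvSep := by
    funext linea; rw [hs]; rfl
  rw [hsep, pvOut_eq_split]
  unfold pvFix
  by_cases h : PySem.Chars.endswith ((pvSplit s.toList).1
      ++ (pvSplit s.toList).2.flatMap pvSep) ['\n'] = true
  · rw [if_pos h, if_pos h, PySem.List.slice_to_neg_one]
  · rw [if_neg h, if_neg h]

-- ===== VERDICT (by name: the statement is the Claim_ definition above) =====
theorem colocandoPuntosDespuesRenglon_spec : Claim_equal_colocandoPuntosDespuesRenglon := by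
  intro s _
  unfold Spec_colocandoPuntosDespuesRenglon
  rw [pvA_eq, pvB_eq]
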